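-- pv_equiv track=rewrite | github.com/csernazs/misc | codejam2018/q/A-solve.py | evaluate_program
-- ===== SOURCE A (Python) =====
-- def evaluate_program(program):
--     retval = 0
--     beam = 1
--     for instr in program:
--         if instr == "C":
--             beam = beam * 2
--         elif instr == "S":
--             retval = retval + beam
--
--     return retval
-- ===== SOURCE B (Python) =====
-- def evaluate_program(program):
--     # Stage 1: split the instruction list at each shot; the trailing segment
--     # (after the last "S") contributes nothing and is dropped.
--     segments = []
--     cur = []
--     for instr in program:
--         if instr == "S":
--             segments.append(cur)
--             cur = []
--         else:
--             cur.append(instr)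
--     # Stage 2: one shot per segment; it is worth 2**(number of "C" seen so far).
--     total = 0
--     c = 0
--     for seg in segments:
--         c += seg.count("C")
--         total += 2 ** c
--     return total
-- ===== Notes on version B (the rewrite author's own statement) =====
-- stated objective: alternative
-- what changed: B replaces A's single-pass beam simulation by a two-stage decomposition: it first splits the instruction list at each shot into segments, then sums 2**(cumulative count of 'C') for each segment.
import Mathlib
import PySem

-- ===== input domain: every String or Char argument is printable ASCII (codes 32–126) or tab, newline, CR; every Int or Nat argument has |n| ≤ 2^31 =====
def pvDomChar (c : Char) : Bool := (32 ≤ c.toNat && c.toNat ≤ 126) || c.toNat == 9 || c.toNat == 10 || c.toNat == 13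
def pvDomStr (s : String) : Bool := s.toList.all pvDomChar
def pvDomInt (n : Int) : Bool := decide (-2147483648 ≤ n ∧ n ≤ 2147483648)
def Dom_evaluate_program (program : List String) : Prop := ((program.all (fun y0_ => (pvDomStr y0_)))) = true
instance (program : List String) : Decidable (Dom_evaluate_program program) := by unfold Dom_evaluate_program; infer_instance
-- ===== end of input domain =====

-- B replaces A's single-pass (retval, beam) simulation by a two-stage decomposition:
-- split the instruction list at each shot, then sum 2^(cumulative C-count) per segment.

-- ===== PORT A =====
def evaluate_program (program : List String) : Int :=
  (program.foldl
    (fun (st : Int × Int) instr =>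
      if instr = "C" then (st.1, st.2 * 2)
      else if instr = "S" then (st.1 + st.2, st.2)
      else st)
    (0, 1)).1

-- ===== PORT B =====
-- stage 1 of Source B: split the instruction list at each "S", dropping the trailing segment
def epSegments (program : List String) : List (List String) :=
  (program.foldl
    (fun (st : List (List String) × List String) instr =>
      if instr = "S" then (st.1 ++ [st.2], [])
      else (st.1, st.2 ++ [instr]))
    ([], [])).1

-- stage 2 of Source B: running C-count per segment, each shot worth 2^count
def evaluate_program_alt (program : List String) : Int :=
  ((epSegments program).foldl
    (fun (st : Int × Int) seg =>
      let c := st.1 + (seg.count "C" : Int)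
      (c, st.2 + 2 ^ c.toNat))
    (0, 0)).2

-- ===== PRECONDITION & SPEC =====
def Spec_evaluate_program (program : List String) (out : Int) : Prop := out = evaluate_program_alt program
instance (program : List String) (out : Int) : Decidable (Spec_evaluate_program program out) := by unfold Spec_evaluate_program; infer_instance

-- ===== CLAIM (what is proved, stated in full; the proofs are below) =====
def Claim_equal_evaluate_program : Prop := ∀ (program : List String), Dom_evaluate_program program → Spec_evaluate_program program (evaluate_program program)

-- ===== LEMMAS AND PROOFS =====

-- reference semantics: value of the program
def eSpec : List String → Int
  | [] => 0
  | x :: t => if x = "C" then 2 * eSpec t else if x = "S" then 1 + eSpec t else eSpec t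

theorem ep_A_key (l : List String) (r b : Int) :
    (l.foldl
      (fun (st : Int × Int) instr =>
        if instr = "C" then (st.1, st.2 * 2)
        else if instr = "S" then (st.1 + st.2, st.2)
        else st)
      (r, b)).1 = r + b * eSpec l := by
  induction l generalizing r b with
  | nil => simp [eSpec]
  | cons x xs ih =>
    simp only [List.foldl_cons, eSpec]
    by_cases hc : x = "C"
    · simp only [hc, reduceIte]; rw [ih]; ring
    · by_cases hs : x = "S"
      · simp only [hs, if_neg (by decide : ¬ ("S" : String) = "C"), reduceIte]
        rw [ih]; ring
      · rw [if_neg hc, if_neg hs, if_neg hc, if_neg hs, ih]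

-- structural characterisation of the split, dropping the trailing segment
def segsOf : List String → List (List String)
  | [] => []
  | x :: t => if x = "S" then [] :: segsOf t else
      match segsOf t with
      | [] => []
      | s :: r => (x :: s) :: r

-- prepend a prefix onto the first segment (if any)
def epPre (pre : List String) : List (List String) → List (List String)
  | [] => []
  | s :: r => (pre ++ s) :: r

theorem epPre_nil (s : List (List String)) : epPre [] s = s := by
  cases s <;> simp [epPre]

theorem ep_split_key (l : List String) (segs : List (List String)) (cur : List String) :
    (l.foldl
      (fun (st : List (List String) × List String) instr =>
        if instr = "S" then (st.1 ++ [st.2], [])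
        else (st.1, st.2 ++ [instr]))
      (segs, cur)).1 = segs ++ epPre cur (segsOf l) := by
  induction l generalizing segs cur with
  | nil => simp [segsOf, epPre]
  | cons x xs ih =>
    simp only [List.foldl_cons, segsOf]
    by_cases hs : x = "S"
    · simp only [hs, reduceIte]
      rw [ih]
      simp [epPre]
      cases segsOf xs <;> rfl
    · rw [if_neg hs, if_neg hs, ih]
      cases h : segsOf xs with
      | nil => simp [epPre]
      | cons s r => simp [epPre]

theorem ep_sum_key (l : List String) (pre : List String) (c t : Int) (hc : 0 ≤ c) :
    ((epPre pre (segsOf l)).foldl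
      (fun (st : Int × Int) seg =>
        let c := st.1 + (seg.count "C" : Int)
        (c, st.2 + 2 ^ c.toNat))
      (c, t)).2 = t + 2 ^ c.toNat * 2 ^ (pre.count "C") * eSpec l := by
  induction l generalizing pre c t with
  | nil => simp [segsOf, epPre, eSpec]
  | cons x xs ih =>
    simp only [segsOf, eSpec]
    by_cases hs : x = "S"
    · simp only [hs, reduceIte, if_neg (by decide : ¬ ("S" : String) = "C")]
      simp only [epPre, List.foldl_cons]
      have h1 : 0 ≤ c + ((pre ++ ([] : List String)).count "C" : Int) := by positivity
      have := ih ([] : List String) (c + ((pre ++ ([] : List String)).count "C" : Int))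
        (t + 2 ^ (c + ((pre ++ ([] : List String)).count "C" : Int)).toNat) h1
      simp only [List.append_nil] at this ⊢
      rw [epPre_nil] at this
      rw [this]
      have hpow : (c + (pre.count "C" : Int)).toNat = c.toNat + pre.count "C" := by omega
      simp [hpow, pow_add, List.count_nil]
      ring
    · rw [if_neg hs, if_neg hs]
      have key : epPre pre (match segsOf xs with
          | [] => ([] : List (List String))
          | s :: r => (x :: s) :: r) = epPre (pre ++ [x]) (segsOf xs) := by
        cases h : segsOf xs with
        | nil => simp [epPre]
        | cons s r => simp [epPre]
      rw [key, ih (pre ++ [x]) c t hc]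
      by_cases hx : x = "C"
      · simp [hx, List.count_append, pow_add]
        ring
      · simp [List.count_append, hx]

-- ===== VERDICT (by name: the statement is the Claim_ definition above) =====
theorem evaluate_program_spec : Claim_equal_evaluate_program := by
  intro program _
  unfold Spec_evaluate_program evaluate_program evaluate_program_alt epSegments
  rw [ep_A_key, ep_split_key]
  have h := ep_sum_key program ([] : List String) 0 0 (le_refl 0)
  rw [epPre_nil] at h
  simp only [List.nil_append, epPre_nil]
  rw [h]
  simp
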